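-- pv_equiv track=rewrite | github.com/linja19/GaitAnalysisBackend | api/utils.py | get_minima
-- ===== SOURCE A (Python) =====
-- def remove_last(l):
--     if l:
--         l.pop()
--
-- def get_minima(test_list,order,low):
--     minima = 100000
--     minima_posi = -order
--     minima_list = []
--     for i in range(1, len(test_list) - 1):
--         prev = test_list[i] - test_list[i - 1]
--         nxt = test_list[i + 1] - test_list[i]
--         if (prev < 0) and (nxt > 0) and test_list[i]<=low:
--             if minima_posi + order >= i:
--                 if minima < test_list[i]:
--                     pass
--                 else:
--                     remove_last(minima_list)
--                     minima_list.append(i)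
--                     minima = test_list[i]
--                     minima_posi = i
--             else:
--                 minima = test_list[i]
--                 minima_posi = i
--                 minima_list.append(i)
--     return minima_list
-- ===== SOURCE B (Python) =====
-- def get_minima(test_list, order, low):
--     cands = [i for i in range(1, len(test_list) - 1)
--              if test_list[i] < test_list[i - 1]
--              and test_list[i + 1] > test_list[i]
--              and test_list[i] <= low]
--     out = []
--     j = 0
--     while j < len(cands):
--         # start a new chain: its first candidate is always accepted
--         p = cands[j]
--         j += 1
--         # absorb every candidate within `order` of the last accepted one,
--         # moving the anchor whenever the value does not exceed the anchor's
--         while j < len(cands) and cands[j] <= p + order: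
--             if test_list[cands[j]] <= test_list[p]:
--                 p = cands[j]
--             j += 1
--         out.append(p)
--     return out
-- ===== Notes on version B (the rewrite author's own statement) =====
-- stated objective: alternative
-- what changed: B groups the below-threshold local minima into spacing chains with nested while loops over an index pointer and emits exactly one winner per chain, appended once and never retracted; it keeps no running-minimum variable, no position sentinel and never rewrites the output, unlike A's single stateful loop that tentatively appends and then pops/replaces its last pick.
import Mathlib
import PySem

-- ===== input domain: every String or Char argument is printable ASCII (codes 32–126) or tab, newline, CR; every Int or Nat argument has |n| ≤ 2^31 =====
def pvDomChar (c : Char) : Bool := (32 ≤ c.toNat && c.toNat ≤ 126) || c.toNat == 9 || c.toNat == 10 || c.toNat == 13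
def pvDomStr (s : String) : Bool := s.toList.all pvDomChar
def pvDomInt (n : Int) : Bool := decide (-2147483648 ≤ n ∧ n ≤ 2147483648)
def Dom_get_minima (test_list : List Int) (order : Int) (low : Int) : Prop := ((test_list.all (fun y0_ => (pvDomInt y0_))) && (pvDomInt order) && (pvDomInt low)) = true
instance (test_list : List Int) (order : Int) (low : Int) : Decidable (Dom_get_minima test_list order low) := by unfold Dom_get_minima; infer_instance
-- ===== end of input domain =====

-- B groups the below-threshold local minima into spacing chains and emits one winner per
-- chain (appended once, never retracted), instead of A's stateful loop with sentinels and
-- pop/replace of its tentative last pick; same cost (alternative decomposition).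

-- ===== PORT A =====
-- remove_last(l): if l: l.pop()
def pvRemoveLast (l : List Int) : List Int := if l.isEmpty then l else l.dropLast

def get_minima (test_list : List Int) (order : Int) (low : Int) : List Int :=
  ((PySem.List.pyRange 1 ((test_list.length : Int) - 1) 1).foldl
    (fun (s : Int × Int × List Int) i =>
      let minima := s.1; let minima_posi := s.2.1; let minima_list := s.2.2
      let prev := PySem.List.pyGetD test_list i 0 - PySem.List.pyGetD test_list (i - 1) 0
      let nxt := PySem.List.pyGetD test_list (i + 1) 0 - PySem.List.pyGetD test_list i 0
      if prev < 0 ∧ nxt > 0 ∧ PySem.List.pyGetD test_list i 0 ≤ low then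
        if minima_posi + order ≥ i then
          if minima < PySem.List.pyGetD test_list i 0 then s
          else (PySem.List.pyGetD test_list i 0, i, pvRemoveLast minima_list ++ [i])
        else (PySem.List.pyGetD test_list i 0, i, minima_list ++ [i])
      else s)
    (100000, -order, [])).2.2

-- ===== PORT B =====
-- inner while loop of Source B: absorb candidates within `order` of the anchor p, moving the
-- anchor when the value does not exceed the anchor's; returns (winner, remaining candidates)
def pvConsume (tl : List Int) (order : Int) (p : Int) (cs : List Int) : Int × List Int :=
  match cs with
  | [] => (p, [])
  | k :: ks =>
      if k ≤ p + order then
        pvConsume tl order (if PySem.List.pyGetD tl k 0 ≤ PySem.List.pyGetD tl p 0 then k else p) ks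
      else (p, k :: ks)

theorem pvConsume_len_le (tl : List Int) (order p : Int) (cs : List Int) :
    (pvConsume tl order p cs).2.length ≤ cs.length := by
  induction cs generalizing p with
  | nil => simp [pvConsume]
  | cons k ks ih =>
    simp only [pvConsume]
    split
    · exact le_trans (ih _) (Nat.le_succ _)
    · simp

-- outer while loop of Source B: one winner appended per chain
def pvChains (tl : List Int) (order : Int) (cs : List Int) : List Int :=
  match cs with
  | [] => []
  | c :: rest =>
      (pvConsume tl order c rest).1 :: pvChains tl order (pvConsume tl order c rest).2
termination_by cs.length
decreasing_by
  simpa using Nat.lt_succ_of_le (pvConsume_len_le tl order c rest)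

def get_minima_alt (test_list : List Int) (order : Int) (low : Int) : List Int :=
  let cands := (PySem.List.pyRange 1 ((test_list.length : Int) - 1) 1).filter
    (fun i => decide (PySem.List.pyGetD test_list i 0 < PySem.List.pyGetD test_list (i - 1) 0 ∧
                      PySem.List.pyGetD test_list (i + 1) 0 > PySem.List.pyGetD test_list i 0 ∧
                      PySem.List.pyGetD test_list i 0 ≤ low))
  pvChains test_list order cands

-- ===== PRECONDITION & SPEC =====
def Spec_get_minima (test_list : List Int) (order : Int) (low : Int) (out : List Int) : Prop := out = get_minima_alt test_list order low
instance (test_list : List Int) (order : Int) (low : Int) (out : List Int) : Decidable (Spec_get_minima test_list order low out) := by unfold Spec_get_minima; infer_instance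

-- ===== CLAIM (what is proved, stated in full; the proofs are below) =====
def Claim_equal_get_minima : Prop := ∀ (test_list : List Int) (order : Int) (low : Int), Dom_get_minima test_list order low → Spec_get_minima test_list order low (get_minima test_list order low)

-- ===== LEMMAS AND PROOFS =====

-- A's inner step once the local-minimum guard has fired
def pvStepA (tl : List Int) (order : Int) (s : Int × Int × List Int) (i : Int) : Int × Int × List Int :=
  if s.2.1 + order ≥ i then
    if s.1 < PySem.List.pyGetD tl i 0 then s
    else (PySem.List.pyGetD tl i 0, i, pvRemoveLast s.2.2 ++ [i])
  else (PySem.List.pyGetD tl i 0, i, s.2.2 ++ [i])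

theorem foldl_filter_eq {α β : Type} (p : α → Bool) (f : β → α → β) (l : List α) (s : β) :
    (l.filter p).foldl f s = l.foldl (fun s a => if p a then f s a else s) s := by
  induction l generalizing s with
  | nil => rfl
  | cons a l ih => by_cases h : p a <;> simp [h, ih]

theorem foldl_ext {α β : Type} {f g : β → α → β} (h : ∀ s a, f s a = g s a) (l : List α) (init : β) :
    l.foldl f init = l.foldl g init := by
  induction l generalizing init with
  | nil => rfl
  | cons a l ih => simp only [List.foldl_cons, h, ih]

theorem pvRemoveLast_concat (l : List Int) (a : Int) : pvRemoveLast (l ++ [a]) = l := by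
  simp [pvRemoveLast]

-- the invariant fold: in the middle of a chain anchored at p, A's output list is res ++ [p]
theorem pvChain_fold (tl : List Int) (order : Int) (cs : List Int) : ∀ (p : Int) (res : List Int),
    (cs.foldl (pvStepA tl order) (PySem.List.pyGetD tl p 0, p, res ++ [p])).2.2 =
      res ++ (pvConsume tl order p cs).1 :: pvChains tl order (pvConsume tl order p cs).2 := by
  induction cs with
  | nil => intro p res; simp [pvConsume, pvChains]
  | cons k ks ih =>
    intro p res
    simp only [List.foldl_cons, pvConsume]
    by_cases hw : k ≤ p + order
    · have hw' : p + order ≥ k := hw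
      by_cases hv : PySem.List.pyGetD tl k 0 ≤ PySem.List.pyGetD tl p 0
      · have hs : pvStepA tl order (PySem.List.pyGetD tl p 0, p, res ++ [p]) k =
            (PySem.List.pyGetD tl k 0, k, res ++ [k]) := by
          simp [pvStepA, hw', pvRemoveLast_concat, not_lt.mpr hv]
        rw [hs, ih k res, if_pos hw, if_pos hv]
      · have hs : pvStepA tl order (PySem.List.pyGetD tl p 0, p, res ++ [p]) k =
            (PySem.List.pyGetD tl p 0, p, res ++ [p]) := by
          simp [pvStepA, hw', lt_of_not_ge hv]
        rw [hs, ih p res, if_pos hw, if_neg hv]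
    · have hs : pvStepA tl order (PySem.List.pyGetD tl p 0, p, res ++ [p]) k =
          (PySem.List.pyGetD tl k 0, k, (res ++ [p]) ++ [k]) := by
        simp only [pvStepA]
        rw [if_neg (by omega)]
      rw [hs, ih k (res ++ [p]), if_neg hw]
      conv_rhs => rw [pvChains]
      simp

-- starting from A's sentinel state, the fold over the candidates computes the chains
theorem pvFold_eq_chains (tl : List Int) (order : Int) (cs : List Int)
    (hpos : ∀ c ∈ cs, 1 ≤ c) :
    (cs.foldl (pvStepA tl order) (100000, -order, [])).2.2 = pvChains tl order cs := by
  cases cs with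
  | nil => simp [pvChains]
  | cons c rest =>
    have hc : 1 ≤ c := hpos c (List.mem_cons_self ..)
    have h1 : pvStepA tl order (100000, -order, []) c =
        (PySem.List.pyGetD tl c 0, c, [] ++ [c]) := by
      simp only [pvStepA]
      rw [if_neg (by omega)]
    rw [List.foldl_cons, h1, pvChain_fold]
    conv_rhs => rw [pvChains]
    simp

-- ===== VERDICT (by name: the statement is the Claim_ definition above) =====
theorem get_minima_spec : Claim_equal_get_minima := by
  intro test_list order low _
  unfold Spec_get_minima get_minima
  show _ = pvChains test_list order
      ((PySem.List.pyRange 1 ((test_list.length : Int) - 1) 1).filter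
        (fun i => decide (PySem.List.pyGetD test_list i 0 < PySem.List.pyGetD test_list (i - 1) 0 ∧
                      PySem.List.pyGetD test_list (i + 1) 0 > PySem.List.pyGetD test_list i 0 ∧
                      PySem.List.pyGetD test_list i 0 ≤ low)))
  rw [← pvFold_eq_chains test_list order _ (by
    intro c hc
    have := (PySem.List.mem_pyRange_one).mp (List.mem_of_mem_filter hc)
    omega)]
  rw [foldl_filter_eq]
  congr 2
  apply foldl_ext
  intro s i
  simp only [decide_eq_true_eq, pvStepA]
  by_cases h1 : PySem.List.pyGetD test_list i 0 < PySem.List.pyGetD test_list (i - 1) 0 ∧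
      PySem.List.pyGetD test_list (i + 1) 0 > PySem.List.pyGetD test_list i 0 ∧
      PySem.List.pyGetD test_list i 0 ≤ low
  · rw [if_pos (show PySem.List.pyGetD test_list i 0 - PySem.List.pyGetD test_list (i - 1) 0 < 0 ∧
        PySem.List.pyGetD test_list (i + 1) 0 - PySem.List.pyGetD test_list i 0 > 0 ∧
        PySem.List.pyGetD test_list i 0 ≤ low from ⟨by omega, by omega, h1.2.2⟩), if_pos h1]
  · rw [if_neg (show ¬ (PySem.List.pyGetD test_list i 0 - PySem.List.pyGetD test_list (i - 1) 0 < 0 ∧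
        PySem.List.pyGetD test_list (i + 1) 0 - PySem.List.pyGetD test_list i 0 > 0 ∧
        PySem.List.pyGetD test_list i 0 ≤ low) from by omega), if_neg h1]
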